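-- pv_equiv track=rewrite | github.com/LTPhat/Medical-Abstract-Skimming-Tool | app.py | put_sentences_into_classes
-- ===== SOURCE A (Python) =====
-- def put_sentences_into_classes(infer_sentences, preds_class):
--     """
--     Separate infer sentences into its own predicted classes
--     """
--
--     objective = ''
--     background = ''
--     method = ''
--     conclusion = ''
--     result = ''
--
--     for line, pred in zip(infer_sentences, preds_class):
--         if pred == 'OBJECTIVE':
--             objective = objective + " " +line
--
--         elif pred == 'BACKGROUND':
--             background = background + " " +line
--
--         elif pred == 'METHODS':
--             method = method + " " +line
--
--         elif pred == 'RESULTS':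
--             result = result + " " +line
--
--         elif pred == 'CONCLUSIONS':
--             conclusion = conclusion + " " + line
--         else:
--             raise NameError("There is something wrong while predicting...")
--
--     return objective, background, method, conclusion, result
-- ===== SOURCE B (Python) =====
-- def put_sentences_into_classes(infer_sentences, preds_class):
--     """Two-phase: collect lines per class into a dict of lists, then join each."""
--     groups = {'OBJECTIVE': [], 'BACKGROUND': [], 'METHODS': [],
--               'RESULTS': [], 'CONCLUSIONS': []}
--     for line, pred in zip(infer_sentences, preds_class):
--         if pred not in groups:
--             raise NameError("There is something wrong while predicting...")
--         groups[pred].append(line)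
--
--     def join(lst):
--         return ''.join(' ' + l for l in lst)
--
--     return (join(groups['OBJECTIVE']), join(groups['BACKGROUND']),
--             join(groups['METHODS']), join(groups['CONCLUSIONS']),
--             join(groups['RESULTS']))
-- ===== Notes on version B (the rewrite author's own statement) =====
-- stated objective: simpler
-- what changed: Replaces the five string accumulators updated through an if/elif chain by a two-phase scheme: one pass collects lines into a dict of per-class lists, then a separate join pass builds each output string.
import Mathlib
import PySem

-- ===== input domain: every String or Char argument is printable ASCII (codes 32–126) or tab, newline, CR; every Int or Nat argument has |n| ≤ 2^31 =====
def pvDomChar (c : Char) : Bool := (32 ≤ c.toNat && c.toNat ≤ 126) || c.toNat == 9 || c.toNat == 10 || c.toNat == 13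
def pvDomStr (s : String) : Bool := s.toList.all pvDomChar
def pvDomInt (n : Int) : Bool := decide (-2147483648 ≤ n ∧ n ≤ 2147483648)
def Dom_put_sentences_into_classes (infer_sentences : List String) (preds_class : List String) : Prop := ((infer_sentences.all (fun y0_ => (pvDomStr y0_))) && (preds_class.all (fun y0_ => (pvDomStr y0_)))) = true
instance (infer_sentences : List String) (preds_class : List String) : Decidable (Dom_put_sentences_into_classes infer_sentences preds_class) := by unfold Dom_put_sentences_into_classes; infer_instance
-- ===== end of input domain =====

-- B replaces A's five if/elif string accumulators by a two-phase scheme (collect per-class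
-- lists in a dict, then join each); objective: simpler. Both raise NameError on an unknown
-- label in the zipped prefix; Pre_ excludes exactly those inputs.

-- ===== PORT A =====
-- A's loop body: if/elif chain updating the five string accumulators
-- (order of the state: objective, background, method, conclusion, result).
def pvAStep (acc : String × String × String × String × String) (lp : String × String) :
    String × String × String × String × String :=
  let (o, b, m, c, r) := acc
  if lp.2 == "OBJECTIVE" then (o ++ " " ++ lp.1, b, m, c, r)
  else if lp.2 == "BACKGROUND" then (o, b ++ " " ++ lp.1, m, c, r)
  else if lp.2 == "METHODS" then (o, b, m ++ " " ++ lp.1, c, r)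
  else if lp.2 == "RESULTS" then (o, b, m, c, r ++ " " ++ lp.1)
  else if lp.2 == "CONCLUSIONS" then (o, b, m, c ++ " " ++ lp.1, r)
  else acc  -- Python raises NameError here; excluded by Pre_

def put_sentences_into_classes (infer_sentences : List String) (preds_class : List String) :
    String × String × String × String × String :=
  (infer_sentences.zip preds_class).foldl pvAStep ("", "", "", "", "")

-- ===== PORT B =====
-- ''.join(' ' + l for l in lst)
def pvJoin (lst : List String) : String := (lst.map (fun l => " " ++ l)).foldl (· ++ ·) ""

-- the initial dict literal {'OBJECTIVE': [], ...}
def pvInit : PySem.Dict String (List String) :=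
  ((((PySem.Dict.empty.insert "OBJECTIVE" []).insert "BACKGROUND" []).insert "METHODS" []).insert
      "RESULTS" []).insert "CONCLUSIONS" []

-- B's loop body: groups[pred].append(line), guarded by 'pred not in groups'
def pvBStep (d : PySem.Dict String (List String)) (lp : String × String) :
    PySem.Dict String (List String) :=
  if d.contains lp.2 then d.modify lp.2 [] (· ++ [lp.1])
  else d  -- Python raises NameError here; excluded by Pre_

def put_sentences_into_classes_alt (infer_sentences : List String) (preds_class : List String) :
    String × String × String × String × String :=
  let g := (infer_sentences.zip preds_class).foldl pvBStep pvInit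
  (pvJoin (g.getD "OBJECTIVE" []), pvJoin (g.getD "BACKGROUND" []),
   pvJoin (g.getD "METHODS" []), pvJoin (g.getD "CONCLUSIONS" []),
   pvJoin (g.getD "RESULTS" []))

-- ===== PRECONDITION & SPEC =====
-- Pre_ excludes exactly the inputs where some zipped prediction is not one of the five
-- class labels: there Python A (and B) raises NameError.
def Pre_put_sentences_into_classes (infer_sentences : List String) (preds_class : List String) : Prop :=
  ∀ q ∈ infer_sentences.zip preds_class,
    q.2 ∈ (["OBJECTIVE", "BACKGROUND", "METHODS", "RESULTS", "CONCLUSIONS"] : List String)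
instance (infer_sentences : List String) (preds_class : List String) : Decidable (Pre_put_sentences_into_classes infer_sentences preds_class) := by unfold Pre_put_sentences_into_classes; infer_instance

def pvWitness_put_sentences_into_classes : List String × List String :=
  (["a", "b", "c"], ["OBJECTIVE", "RESULTS", "OBJECTIVE"])

def Spec_put_sentences_into_classes (infer_sentences : List String) (preds_class : List String) (out : String × String × String × String × String) : Prop := out = put_sentences_into_classes_alt infer_sentences preds_class
instance (infer_sentences : List String) (preds_class : List String) (out : String × String × String × String × String) : Decidable (Spec_put_sentences_into_classes infer_sentences preds_class out) := by unfold Spec_put_sentences_into_classes; infer_instance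

-- ===== CLAIM (what is proved, stated in full; the proofs are below) =====
def Claim_equal_put_sentences_into_classes : Prop := ∀ (infer_sentences : List String) (preds_class : List String), Dom_put_sentences_into_classes infer_sentences preds_class → Pre_put_sentences_into_classes infer_sentences preds_class → Spec_put_sentences_into_classes infer_sentences preds_class (put_sentences_into_classes infer_sentences preds_class)

-- ===== LEMMAS AND PROOFS =====

lemma pvJoin_append (lst : List String) (x : String) :
    pvJoin (lst ++ [x]) = pvJoin lst ++ " " ++ x := by
  simp [pvJoin, List.foldl_append, String.append_assoc]

-- loop invariant: running A's fold from the joins of a dict's entries equals the joins of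
-- B's fold of that dict, provided the dict contains all five keys and all labels are valid.
lemma pv_loop_inv (pairs : List (String × String))
    (hp : ∀ q ∈ pairs, q.2 ∈ (["OBJECTIVE", "BACKGROUND", "METHODS", "RESULTS", "CONCLUSIONS"] : List String))
    (d : PySem.Dict String (List String))
    (hc : ∀ k ∈ (["OBJECTIVE", "BACKGROUND", "METHODS", "RESULTS", "CONCLUSIONS"] : List String), d.contains k = true) :
    pairs.foldl pvAStep
      (pvJoin (d.getD "OBJECTIVE" []), pvJoin (d.getD "BACKGROUND" []),
       pvJoin (d.getD "METHODS" []), pvJoin (d.getD "CONCLUSIONS" []),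
       pvJoin (d.getD "RESULTS" []))
    = (let g := pairs.foldl pvBStep d;
       (pvJoin (g.getD "OBJECTIVE" []), pvJoin (g.getD "BACKGROUND" []),
        pvJoin (g.getD "METHODS" []), pvJoin (g.getD "CONCLUSIONS" []),
        pvJoin (g.getD "RESULTS" []))) := by
  induction pairs generalizing d with
  | nil => simp
  | cons q rest ih =>
    have hq := hp q (List.mem_cons_self ..)
    have hrest : ∀ p ∈ rest, p.2 ∈ (["OBJECTIVE", "BACKGROUND", "METHODS", "RESULTS", "CONCLUSIONS"] : List String) :=
      fun p hm => hp p (List.mem_cons_of_mem _ hm)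
    simp only [List.mem_cons, List.not_mem_nil, or_false] at hq
    have step : ∀ key : String, q.2 = key →
        pvBStep d q = d.modify key [] (· ++ [q.1]) := by
      intro key hk
      simp [pvBStep, hk, hc key (by rw [← hk]; exact hp q (List.mem_cons_self ..))]
    rcases hq with h | h | h | h | h <;>
    · rw [List.foldl_cons, List.foldl_cons, step _ h,
        ← ih hrest _ (by intro k hk; simp [PySem.Dict.contains_modify, hc k hk])]
      congr 1
      simp [pvAStep, h, PySem.Dict.getD_modify, pvJoin_append]

-- ===== VERDICT (by name: the statement is the Claim_ definition above) =====
theorem put_sentences_into_classes_spec : Claim_equal_put_sentences_into_classes := by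
  intro infer_sentences preds_class _hdom hpre
  show put_sentences_into_classes infer_sentences preds_class
      = put_sentences_into_classes_alt infer_sentences preds_class
  unfold put_sentences_into_classes put_sentences_into_classes_alt
  have h0 : ∀ k ∈ (["OBJECTIVE", "BACKGROUND", "METHODS", "RESULTS", "CONCLUSIONS"] : List String),
      pvInit.contains k = true := by decide
  have := pv_loop_inv (infer_sentences.zip preds_class) hpre pvInit h0
  have hinit : ∀ k, pvInit.getD k ([] : List String) = [] := by
    intro k; simp [pvInit, PySem.Dict.getD_insert, PySem.Dict.getD_empty]
  simpa [hinit, pvJoin] using this
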